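-- pv_equiv track=rewrite | github.com/Harrison-Hughes/project_euler | problem17.py | calc_length_of_num
-- ===== SOURCE A (Python) =====
-- def calc_length_of_num(x):
--     key_num = {1: 3, 2: 3, 3: 5, 4: 4, 5: 4, 6: 3, 7: 5, 8: 5, 9: 4, 10: 3, 11: 6, 12: 6,
--                13: 8, 14: 8, 15: 7, 16: 7, 17: 9, 18: 8, 19: 8, 20: 6, 30: 6, 40: 5, 50: 5, 60: 5, 70: 7, 80: 6, 90: 6, 1000: 11}
--
--     if x == 0:
--         return 0
--
--     if x in key_num:
--         return key_num[x]
--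
--     def calc_length_less_than_100(x):
--         if x == 0:
--             return x
--         return key_num[(int(x/10)*10)] + key_num[int(x % 10)]
--
--     if int(x/100) == 0:  # less than 100
--         return calc_length_less_than_100(x)
--     else:  # >= 100
--
--         if x % 100 == 0:  # exact divisor of 100
--             return key_num[int(x/100)] + 7  # x hundred
--         else:
--             # x hundred and x
--             return key_num[int(x/100)] + 10 + calc_length_of_num(x - 100*int(x/100))
-- ===== SOURCE B (Python) =====
-- # B: spell the number as English words (no spaces) and return the string's length,
-- # instead of summing a letter-count table; word lists replace the count dictionary.
-- UNITS = ["", "one", "two", "three", "four", "five", "six", "seven", "eight", "nine"]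
-- TEENS = ["ten", "eleven", "twelve", "thirteen", "fourteen", "fifteen",
--          "sixteen", "seventeen", "eighteen", "nineteen"]
-- TENS = ["", "", "twenty", "thirty", "forty", "fifty", "sixty", "seventy",
--         "eighty", "ninety"]
--
--
-- def _spell(n):
--     # English word form (spaces omitted) of n, for n in 1..99 or n == 1000
--     if n == 1000:
--         return "onethousand"
--     if n < 10:
--         return UNITS[n]
--     if n < 20:
--         return TEENS[n - 10]
--     return TENS[n // 10] + UNITS[n % 10]
--
--
-- def calc_length_of_num(x):
--     if x == 0:
--         return 0
--     if x == 1000: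
--         return len(_spell(1000))
--     h, r = divmod(x, 100)
--     if h == 0:
--         return len(_spell(x))
--     s = _spell(h) + "hundred"
--     if r:
--         s += "and" + _spell(r)
--     return len(s)
-- ===== Notes on version B (the rewrite author's own statement) =====
-- stated objective: alternative
-- what changed: B drops the letter-count dictionary and the nested helper/self-recursion entirely: it spells the number as an English word string built from unit/teen/ten word lists and returns the length of that string.
import Mathlib
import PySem

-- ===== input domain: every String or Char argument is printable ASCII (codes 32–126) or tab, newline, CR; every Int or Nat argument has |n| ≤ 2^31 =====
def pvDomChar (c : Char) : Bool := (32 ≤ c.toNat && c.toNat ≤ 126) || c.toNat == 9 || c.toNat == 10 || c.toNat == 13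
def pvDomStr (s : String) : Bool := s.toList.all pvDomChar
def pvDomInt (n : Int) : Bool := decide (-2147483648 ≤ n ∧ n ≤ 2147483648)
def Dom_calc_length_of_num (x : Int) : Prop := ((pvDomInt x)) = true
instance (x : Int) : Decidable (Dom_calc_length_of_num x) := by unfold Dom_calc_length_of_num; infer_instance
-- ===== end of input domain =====

-- B spells the number as an English word string (word lists, no count table, no recursion)
-- and returns the string's length (objective: alternative).

-- ===== PORT A =====
def keyNumA : PySem.Dict Int Int := PySem.Dict.ofList
  [(1,3),(2,3),(3,5),(4,4),(5,4),(6,3),(7,5),(8,5),(9,4),(10,3),(11,6),(12,6),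
   (13,8),(14,8),(15,7),(16,7),(17,9),(18,8),(19,8),(20,6),(30,6),(40,5),(50,5),
   (60,5),(70,7),(80,6),(90,6),(1000,11)]

-- int(x/10), int(x/100): truncating division (exact for |x| ≤ 2^31, where float division
-- never crosses an integer); ported as Int.tdiv.  A dict lookup whose key is absent raises
-- KeyError in Python: those inputs are excluded by Pre_ below and the `none` arms are unreachable there.
def calcLessThan100A (x : Int) : Int :=
  if x == 0 then x
  else
    match keyNumA.get? ((x.tdiv 10) * 10), keyNumA.get? (PySem.Int.mod x 10) with
    | some a, some b => a + b
    | _, _ => 0  -- KeyError: outside Pre_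

-- A's self-recursion, with a fuel guard for totality only: recursion happens only after
-- key_num[int(x/100)] succeeded, so the recursive argument is x % 100 < 100, which never
-- recurses again — depth ≤ 2 on every input, so fuel 2 is exact everywhere.
def calcA : Nat → Int → Int
  | 0, _ => 0
  | fuel + 1, x =>
    if x == 0 then 0
    else
      match keyNumA.get? x with
      | some v => v
      | none =>
        if x.tdiv 100 == 0 then calcLessThan100A x
        else if PySem.Int.mod x 100 == 0 then
          match keyNumA.get? (x.tdiv 100) with
          | some v => v + 7
          | none => 0  -- KeyError: outside Pre_
        else
          match keyNumA.get? (x.tdiv 100) with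
          | some v => v + 10 + calcA fuel (x - 100 * (x.tdiv 100))
          | none => 0  -- KeyError: outside Pre_

def calc_length_of_num (x : Int) : Int := calcA 2 x

-- ===== PORT B =====
def unitsB : List String := ["","one","two","three","four","five","six","seven","eight","nine"]
def teensB : List String := ["ten","eleven","twelve","thirteen","fourteen","fifteen",
                             "sixteen","seventeen","eighteen","nineteen"]
def tensB : List String := ["","","twenty","thirty","forty","fifty","sixty","seventy",
                            "eighty","ninety"]

-- _spell: list indexing raises IndexError where pyGet? is none — outside Pre_, getD "" unreachable there
def spellB (n : Int) : String :=
  if n == 1000 then "onethousand"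
  else if n < 10 then (PySem.List.pyGet? unitsB n).getD ""
  else if n < 20 then (PySem.List.pyGet? teensB (n - 10)).getD ""
  else (PySem.List.pyGet? tensB (PySem.Int.floordiv n 10)).getD ""
       ++ (PySem.List.pyGet? unitsB (PySem.Int.mod n 10)).getD ""

def calc_length_of_num_alt (x : Int) : Int :=
  if x == 0 then 0
  else if x == 1000 then PySem.Str.len (spellB 1000)
  else
    let h := PySem.Int.floordiv x 100
    let r := PySem.Int.mod x 100
    if h == 0 then PySem.Str.len (spellB x)
    else
      let s := spellB h ++ "hundred"
      let s := if r != 0 then s ++ "and" ++ spellB r else s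
      PySem.Str.len s

-- ===== PRECONDITION & SPEC =====
-- the keys of key_num that can serve as a hundreds part
def pvHundredsKeys : List Int :=
  [1,2,3,4,5,6,7,8,9,10,11,12,13,14,15,16,17,18,19,20,30,40,50,60,70,80,90,1000]

-- Pre_ excludes exactly the inputs on which A raises KeyError: negative x, and
-- x ≥ 100 whose hundreds part x//100 is not a key of key_num.
def Pre_calc_length_of_num (x : Int) : Prop :=
  0 ≤ x ∧ (x ≤ 99 ∨ x / 100 ∈ pvHundredsKeys)
instance (x : Int) : Decidable (Pre_calc_length_of_num x) := by
  unfold Pre_calc_length_of_num; infer_instance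

def pvWitness_calc_length_of_num : Int := 342

def Spec_calc_length_of_num (x : Int) (out : Int) : Prop := out = calc_length_of_num_alt x
instance (x : Int) (out : Int) : Decidable (Spec_calc_length_of_num x out) := by
  unfold Spec_calc_length_of_num; infer_instance

-- ===== CLAIM (what is proved, stated in full; the proofs are below) =====
def Claim_equal_calc_length_of_num : Prop :=
  ∀ (x : Int), Dom_calc_length_of_num x → Pre_calc_length_of_num x →
    Spec_calc_length_of_num x (calc_length_of_num x)

-- ===== LEMMAS AND PROOFS =====

-- proof-side copy of A's dictionary as a plain literal the kernel evaluates cheaply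
def keyLit : PySem.Dict Int Int := PySem.Dict.mk
  [(1,3),(2,3),(3,5),(4,4),(5,4),(6,3),(7,5),(8,5),(9,4),(10,3),(11,6),(12,6),
   (13,8),(14,8),(15,7),(16,7),(17,9),(18,8),(19,8),(20,6),(30,6),(40,5),(50,5),
   (60,5),(70,7),(80,6),(90,6),(1000,11)]

theorem keyA_eq : keyNumA = keyLit := by decide

def lt100Fast (x : Int) : Int :=
  if x == 0 then x
  else
    match keyLit.get? ((x.tdiv 10) * 10), keyLit.get? (PySem.Int.mod x 10) with
    | some a, some b => a + b
    | _, _ => 0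

def aFast : Nat → Int → Int
  | 0, _ => 0
  | fuel + 1, x =>
    if x == 0 then 0
    else
      match keyLit.get? x with
      | some v => v
      | none =>
        if x.tdiv 100 == 0 then lt100Fast x
        else if PySem.Int.mod x 100 == 0 then
          match keyLit.get? (x.tdiv 100) with
          | some v => v + 7
          | none => 0
        else
          match keyLit.get? (x.tdiv 100) with
          | some v => v + 10 + aFast fuel (x - 100 * (x.tdiv 100))
          | none => 0

theorem lt100_eq (x : Int) : calcLessThan100A x = lt100Fast x := by
  unfold calcLessThan100A lt100Fast; rw [keyA_eq]

theorem aFast_eq : ∀ fuel x, calcA fuel x = aFast fuel x := by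
  intro fuel
  induction fuel with
  | zero => intro x; rfl
  | succ f ih =>
    intro x
    unfold calcA aFast
    rw [keyA_eq, lt100_eq]
    simp only [ih]

theorem pvStep (k v x : Int) (rest : List (Int × Int)) (hne : k ≠ x) :
    (PySem.Dict.mk ((k, v) :: rest)).get? x = (PySem.Dict.mk rest).get? x := by
  rw [PySem.Dict.get?_mk_cons, if_neg]
  simp [hne]

theorem keyLit_none_of_big (x : Int) (h100 : 100 ≤ x) (h1000 : x ≠ 1000) :
    keyLit.get? x = none := by
  show (PySem.Dict.mk _).get? x = none
  rw [pvStep 1 3 x _ (by omega),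
      pvStep 2 3 x _ (by omega),
      pvStep 3 5 x _ (by omega),
      pvStep 4 4 x _ (by omega),
      pvStep 5 4 x _ (by omega),
      pvStep 6 3 x _ (by omega),
      pvStep 7 5 x _ (by omega),
      pvStep 8 5 x _ (by omega),
      pvStep 9 4 x _ (by omega),
      pvStep 10 3 x _ (by omega),
      pvStep 11 6 x _ (by omega),
      pvStep 12 6 x _ (by omega),
      pvStep 13 8 x _ (by omega),
      pvStep 14 8 x _ (by omega),
      pvStep 15 7 x _ (by omega),
      pvStep 16 7 x _ (by omega),
      pvStep 17 9 x _ (by omega),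
      pvStep 18 8 x _ (by omega),
      pvStep 19 8 x _ (by omega),
      pvStep 20 6 x _ (by omega),
      pvStep 30 6 x _ (by omega),
      pvStep 40 5 x _ (by omega),
      pvStep 50 5 x _ (by omega),
      pvStep 60 5 x _ (by omega),
      pvStep 70 7 x _ (by omega),
      pvStep 80 6 x _ (by omega),
      pvStep 90 6 x _ (by omega),
      pvStep 1000 11 x _ (by omega)]
  rfl

-- below 100, the ports agree (both the x == 0 fast path and the tens/units assembly vs spelling)
set_option maxRecDepth 8000 in
theorem small_agree : ∀ n : Nat, n < 100 →
    aFast 2 (n : Int) = calc_length_of_num_alt (n : Int) := by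
  decide

-- A's one-level recursion on the remainder equals the length of the spelled remainder
set_option maxRecDepth 8000 in
theorem rec_eq_spell : ∀ n : Nat, n < 100 →
    aFast 1 (n : Int) = PySem.Str.len (spellB (n : Int)) := by
  decide

-- A's table value at a hundreds key is the length of B's spelling of that key
theorem key_spell : ∀ c ∈ pvHundredsKeys,
    keyLit.get? c = some (PySem.Str.len (spellB c)) := by
  decide

theorem alt_red (x : Int) (h0 : (x == 0) = false) (h1000 : (x == 1000) = false)
    (hh : (PySem.Int.floordiv x 100 == 0) = false)
    (hr : (PySem.Int.mod x 100 == 0) = false) :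
    calc_length_of_num_alt x =
      PySem.Str.len (spellB (PySem.Int.floordiv x 100)) + 7 +
        (3 + PySem.Str.len (spellB (PySem.Int.mod x 100))) := by
  unfold calc_length_of_num_alt
  simp only [h0, h1000, hh, Bool.false_eq_true, if_false]
  rw [if_pos (by
    rw [show (PySem.Int.mod x 100 != 0) = !(PySem.Int.mod x 100 == 0) from rfl, hr]; rfl)]
  rw [PySem.Str.len_append, PySem.Str.len_append, PySem.Str.len_append]
  have h7 : PySem.Str.len ("hundred" : String) = 7 := by decide
  have h3 : PySem.Str.len ("and" : String) = 3 := by decide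
  rw [h7, h3]
  ring

theorem alt_red0 (x : Int) (h0 : (x == 0) = false) (h1000 : (x == 1000) = false)
    (hh : (PySem.Int.floordiv x 100 == 0) = false)
    (hr : (PySem.Int.mod x 100 == 0) = true) :
    calc_length_of_num_alt x =
      PySem.Str.len (spellB (PySem.Int.floordiv x 100)) + 7 := by
  unfold calc_length_of_num_alt
  simp only [h0, h1000, hh, Bool.false_eq_true, if_false]
  rw [if_neg (by rw [eq_of_beq hr]; decide)]
  rw [PySem.Str.len_append]
  have h7 : PySem.Str.len ("hundred" : String) = 7 := by decide
  rw [h7]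

theorem aFast_two_red (x : Int) (h0 : (x == 0) = false) (hk : keyLit.get? x = none)
    (ht : (x.tdiv 100 == 0) = false) (hm : (PySem.Int.mod x 100 == 0) = false) :
    aFast 2 x = (match keyLit.get? (x.tdiv 100) with
      | some v => v + 10 + aFast 1 (x - 100 * (x.tdiv 100))
      | none => 0) := by
  conv_lhs => rw [show aFast 2 x = (if x == 0 then (0 : Int) else
    match keyLit.get? x with
    | some v => v
    | none =>
      if x.tdiv 100 == 0 then lt100Fast x
      else if PySem.Int.mod x 100 == 0 then
        (match keyLit.get? (x.tdiv 100) with | some v => v + 7 | none => 0)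
      else
        (match keyLit.get? (x.tdiv 100) with
         | some v => v + 10 + aFast 1 (x - 100 * (x.tdiv 100))
         | none => 0)) from rfl]
  simp only [h0, hk, ht, hm, Bool.false_eq_true, if_false]

theorem aFast_two_red0 (x : Int) (h0 : (x == 0) = false) (hk : keyLit.get? x = none)
    (ht : (x.tdiv 100 == 0) = false) (hm : (PySem.Int.mod x 100 == 0) = true) :
    aFast 2 x = (match keyLit.get? (x.tdiv 100) with
      | some v => v + 7
      | none => 0) := by
  conv_lhs => rw [show aFast 2 x = (if x == 0 then (0 : Int) else
    match keyLit.get? x with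
    | some v => v
    | none =>
      if x.tdiv 100 == 0 then lt100Fast x
      else if PySem.Int.mod x 100 == 0 then
        (match keyLit.get? (x.tdiv 100) with | some v => v + 7 | none => 0)
      else
        (match keyLit.get? (x.tdiv 100) with
         | some v => v + 10 + aFast 1 (x - 100 * (x.tdiv 100))
         | none => 0)) from rfl]
  simp only [h0, hk, ht, hm, Bool.false_eq_true, if_false, if_true]

theorem hundreds_agree (c r : Int) (hc : c ∈ pvHundredsKeys) (hr0 : 0 ≤ r)
    (hr : r < 100) (hne1000 : ¬(c = 10 ∧ r = 0)) :
    aFast 2 (100 * c + r) = calc_length_of_num_alt (100 * c + r) := by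
  have hcb : 1 ≤ c ∧ c ≤ 1000 := by fin_cases hc <;> omega
  have hx0 : (100 * c + r) ≠ 0 := by omega
  have hxne : (100 * c + r) ≠ 1000 := by
    intro h
    have : c = 10 ∧ r = 0 := by fin_cases hc <;> omega
    exact hne1000 this
  have hkey : keyLit.get? (100 * c + r) = none :=
    keyLit_none_of_big _ (by omega) hxne
  have htd : (100 * c + r).tdiv 100 = c := by
    rw [Int.tdiv_eq_ediv_of_nonneg (by omega)]; omega
  have hmod : PySem.Int.mod (100 * c + r) 100 = r := by
    rw [PySem.Int.mod_eq_emod_of_pos (by omega : (0:Int) < 100)]; omega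
  have hfd : PySem.Int.floordiv (100 * c + r) 100 = c := by
    rw [PySem.Int.floordiv_eq_ediv_of_pos (by omega : (0:Int) < 100)]; omega
  have hks := key_spell c hc
  have hb0 : ((100 * c + r : Int) == 0) = false := by simp; omega
  have hb1000 : ((100 * c + r : Int) == 1000) = false := by simp; omega
  have hbh : (PySem.Int.floordiv (100 * c + r) 100 == 0) = false := by
    rw [hfd]; simp; omega
  have hbt : ((100 * c + r).tdiv 100 == 0) = false := by
    rw [htd]; simp; omega
  rcases eq_or_ne r 0 with hz | hnz
  · subst hz
    rw [aFast_two_red0 _ hb0 hkey hbt (by rw [hmod]; simp), htd]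
    simp only [hks]
    rw [alt_red0 _ hb0 hb1000 hbh (by rw [hmod]; simp), hfd]
  · have hbm : (PySem.Int.mod (100 * c + r) 100 == 0) = false := by
      rw [hmod]; simp [hnz]
    rw [aFast_two_red _ hb0 hkey hbt hbm, htd]
    simp only [hks]
    rw [show 100 * c + r - 100 * c = r from by ring]
    have hrec : aFast 1 r = PySem.Str.len (spellB r) := by
      have h := rec_eq_spell r.toNat (by omega)
      rwa [Int.toNat_of_nonneg hr0] at h
    rw [hrec]
    rw [alt_red _ hb0 hb1000 hbh hbm, hfd, hmod]
    ring

-- ===== VERDICT (by name: the statement is the Claim_ definition above) =====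
theorem calc_length_of_num_spec : Claim_equal_calc_length_of_num := by
  intro x _hdom hpre
  unfold Spec_calc_length_of_num
  show calc_length_of_num x = calc_length_of_num_alt x
  unfold calc_length_of_num
  rw [aFast_eq]
  obtain ⟨hx0, hcase⟩ := hpre
  rcases hcase with hsmall | hbig
  · have h := small_agree x.toNat (by omega)
    rwa [Int.toNat_of_nonneg hx0] at h
  · rcases eq_or_ne x 1000 with h1000 | h1000
    · subst h1000; decide
    · have hc1 : 1 ≤ x / 100 := by
        have h := hbig
        simp only [pvHundredsKeys, List.mem_cons, List.not_mem_nil, or_false] at h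
        omega
      have hx : x = 100 * (x / 100) + (x - 100 * (x / 100)) := by ring
      rw [hx]
      exact hundreds_agree (x / 100) (x - 100 * (x / 100)) hbig (by omega) (by omega)
        (by omega)
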